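-- pv_equiv track=rewrite | github.com/Lexora-Labs/lexora-ai | src/lexora/translator.py | _chunk_text_sentence_aware
-- ===== SOURCE A (Python) =====
-- from typing import Optional, List, Dict, Any, Tuple, Callable
--
-- def _chunk_text_sentence_aware(text: str, max_chars: int = 1200) -> List[str]:
--     """Split long text into sentence-aware chunks while preserving original order."""
--     if len(text) <= max_chars:
--         return [text]
--
--     sentence_endings = {".", "!", "?", "。", "！", "？", ";", ":", "\n"}
--     chunks: List[str] = []
--     buffer = ""
--     last_boundary = -1
--
--     for char in text:
--         buffer += char
--         if char in sentence_endings: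
--             last_boundary = len(buffer)
--
--         if len(buffer) >= max_chars:
--             if last_boundary >= max_chars // 2:
--                 chunks.append(buffer[:last_boundary])
--                 buffer = buffer[last_boundary:]
--             else:
--                 chunks.append(buffer[:max_chars])
--                 buffer = buffer[max_chars:]
--
--             last_boundary = -1
--             for index, buffer_char in enumerate(buffer):
--                 if buffer_char in sentence_endings:
--                     last_boundary = index + 1
--
--     if buffer:
--         chunks.append(buffer)
--
--     return [chunk for chunk in chunks if chunk]
-- ===== SOURCE B (Python) =====
-- def _chunk_text_sentence_aware(text: str, max_chars: int = 1200):
--     """Sentence-aware chunking via a precomputed boundary index and greedy jumps."""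
--     if len(text) <= max_chars:
--         return [text]
--     endings = {".", "!", "?", "\u3002", "\uff01", "\uff1f", ";", ":", "\n"}
--     bounds = [i + 1 for i, ch in enumerate(text) if ch in endings]
--     chunks = []
--     start = 0
--     n = len(text)
--     while start + max_chars <= n:
--         window = [b for b in bounds if start < b <= start + max_chars]
--         last = (window[-1] - start) if window else -1
--         cut = start + last if last >= max_chars // 2 else start + max_chars
--         chunks.append(text[start:cut])
--         start = cut
--     if start < n:
--         chunks.append(text[start:])
--     return chunks
-- ===== Notes on version B (the rewrite author's own statement) =====
-- stated objective: alternative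
-- what changed: Replaces the char-by-char buffer accumulation (string concatenation, cut-on-overflow, and a rescan of the leftover buffer after every cut) by a precomputed index of all sentence-boundary positions plus a greedy outer loop that jumps start->cut directly on absolute positions, slicing each chunk out of the original text.
-- outside the precondition, e.g. on _chunk_text_sentence_aware('ab.', 0): A returns ['ab.'], B does not finish within the time limit; on _chunk_text_sentence_aware('ab.', -2): A returns ['a', 'b.'], B does not finish within the time limit
import Mathlib
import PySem

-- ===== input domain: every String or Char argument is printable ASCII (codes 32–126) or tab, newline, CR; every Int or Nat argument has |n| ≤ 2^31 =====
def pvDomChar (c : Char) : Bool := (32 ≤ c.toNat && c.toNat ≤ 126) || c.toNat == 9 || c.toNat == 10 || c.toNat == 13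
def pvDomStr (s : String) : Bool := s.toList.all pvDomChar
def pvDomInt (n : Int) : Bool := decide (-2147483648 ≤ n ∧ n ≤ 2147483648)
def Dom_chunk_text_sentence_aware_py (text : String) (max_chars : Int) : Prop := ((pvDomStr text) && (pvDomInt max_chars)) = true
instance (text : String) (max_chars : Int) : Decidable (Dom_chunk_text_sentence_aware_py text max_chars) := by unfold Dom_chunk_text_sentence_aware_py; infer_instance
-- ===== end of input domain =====

-- B replaces A's char-by-char buffer accumulation by a precomputed boundary index
-- and a greedy loop that jumps from cut to cut, slicing chunks out of the text.

-- ===== PORT A =====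
def pvAEndings : List Char := ['.', '!', '?', '。', '！', '？', ';', ':', '\n']

def pvAIsEnd (c : Char) : Bool := pvAEndings.contains c

-- the rescan loop "for index, buffer_char in enumerate(buffer): …" recomputing last_boundary
def pvARescan (buf : List Char) : Int :=
  (PySem.List.enumerate buf 0).foldl (fun acc p => if pvAIsEnd p.2 then p.1 + 1 else acc) (-1)

-- one iteration of "for char in text": state = (chunks, buffer, last_boundary)
def pvAStep (max_chars : Int) (st : List (List Char) × List Char × Int) (c : Char) :
    List (List Char) × List Char × Int :=
  let buffer := st.2.1 ++ [c]
  let lb : Int := if pvAIsEnd c then (buffer.length : Int) else st.2.2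
  if (buffer.length : Int) ≥ max_chars then
    if lb ≥ PySem.Int.floordiv max_chars 2 then
      let rest := PySem.List.slice buffer (some lb) none
      (st.1 ++ [PySem.List.slice buffer none (some lb)], rest, pvARescan rest)
    else
      let rest := PySem.List.slice buffer (some max_chars) none
      (st.1 ++ [PySem.List.slice buffer none (some max_chars)], rest, pvARescan rest)
  else
    (st.1, buffer, lb)

def chunk_text_sentence_aware_py (text : String) (max_chars : Int) : List String :=
  let tl := text.toList
  if (tl.length : Int) ≤ max_chars then [text]
  else
    let st := tl.foldl (pvAStep max_chars) ([], [], -1)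
    let chunks := if st.2.1 ≠ [] then st.1 ++ [st.2.1] else st.1
    (chunks.filter (fun ch => ch ≠ [])).map (fun l => String.ofList l)

-- ===== PORT B =====
def pvBEndings : List Char := ['.', '!', '?', '。', '！', '？', ';', ':', '\n']

def pvBIsEnd (c : Char) : Bool := pvBEndings.contains c

-- bounds = [i + 1 for i, ch in enumerate(text) if ch in endings]
def pvBBounds (tl : List Char) : List Int :=
  ((PySem.List.enumerate tl 0).filter (fun p => pvBIsEnd p.2)).map (fun p => p.1 + 1)

-- the "while start + max_chars <= n" loop (fuel only makes the recursion structural;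
-- inside Pre_ each step advances start by at least one, so fuel = len(text)+1 never runs out)
def pvBLoop (tl : List Char) (max_chars : Int) (bounds : List Int) :
    Nat → Int → List String → List String
  | 0, _, acc => acc
  | fuel + 1, start, acc =>
    if start + max_chars ≤ (tl.length : Int) then
      let window := bounds.filter (fun b => start < b && b ≤ start + max_chars)
      let last : Int := match window.getLast? with
        | some b => b - start
        | none => -1
      let cut : Int := if last ≥ PySem.Int.floordiv max_chars 2 then start + last else start + max_chars
      pvBLoop tl max_chars bounds fuel cut
        (acc ++ [String.ofList (PySem.List.slice tl (some start) (some cut))])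
    else
      if start < (tl.length : Int) then acc ++ [String.ofList (PySem.List.slice tl (some start) none)]
      else acc

def chunk_text_sentence_aware_py_alt (text : String) (max_chars : Int) : List String :=
  let tl := text.toList
  if (tl.length : Int) ≤ max_chars then [text]
  else pvBLoop tl max_chars (pvBBounds tl) (tl.length + 1) 0 []

-- ===== PRECONDITION & SPEC =====
-- Pre_ excludes max_chars ≤ 0, outside the natural domain of a chunk size: there A's
-- returned chunking is an accident of empty/negative slices and B's greedy loop,
-- whose cut cannot advance, does not terminate.
def Pre_chunk_text_sentence_aware_py (text : String) (max_chars : Int) : Prop := 1 ≤ max_chars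
instance (text : String) (max_chars : Int) : Decidable (Pre_chunk_text_sentence_aware_py text max_chars) := by unfold Pre_chunk_text_sentence_aware_py; infer_instance

def pvWitness_chunk_text_sentence_aware_py : String × Int := ("Hi. Bye now.", 6)

def Spec_chunk_text_sentence_aware_py (text : String) (max_chars : Int) (out : List String) : Prop := out = chunk_text_sentence_aware_py_alt text max_chars
instance (text : String) (max_chars : Int) (out : List String) : Decidable (Spec_chunk_text_sentence_aware_py text max_chars out) := by unfold Spec_chunk_text_sentence_aware_py; infer_instance

-- ===== CLAIM (what is proved, stated in full; the proofs are below) =====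
def Claim_equal_chunk_text_sentence_aware_py : Prop := ∀ (text : String) (max_chars : Int), Dom_chunk_text_sentence_aware_py text max_chars → Pre_chunk_text_sentence_aware_py text max_chars → Spec_chunk_text_sentence_aware_py text max_chars (chunk_text_sentence_aware_py text max_chars)

-- ===== LEMMAS AND PROOFS =====

-- the common greedy "one chunk per step" reference function on the remaining text
def pvG (m : Nat) : Nat → List Char → List String
  | 0, _ => []
  | fuel + 1, s =>
    if m ≤ s.length then
      let lbv := pvARescan (s.take m)
      let cutN : Nat := if lbv ≥ ((m / 2 : Nat) : Int) then lbv.toNat else m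
      String.ofList (s.take cutN) :: pvG m fuel (s.drop cutN)
    else if s = [] then [] else [String.ofList s]

def pvAFin (st : List (List Char) × List Char × Int) : List String :=
  ((if st.2.1 ≠ [] then st.1 ++ [st.2.1] else st.1).filter (fun ch => ch ≠ [])).map (fun l => String.ofList l)

theorem pv_foldl_if_getLast? {α β : Type} (p : α → Bool) (g : α → β) (init : β) (l : List α) :
    l.foldl (fun acc x => if p x then g x else acc) init
      = ((l.filter p).getLast?.map g).getD init := by
  induction l using List.reverseRecOn with
  | nil => rfl
  | append_singleton l x ih =>
      rw [List.foldl_append, List.filter_append, ih]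
      by_cases hx : p x
      · simp [hx]
      · simp [hx]

theorem pv_enumerate_shift {α : Type} (ys : List α) (s : Int) :
    PySem.List.enumerate ys s = (PySem.List.enumerate ys 0).map (fun p => (p.1 + s, p.2)) := by
  induction ys generalizing s with
  | nil => simp [PySem.List.enumerate_nil]
  | cons y ys ih =>
      rw [PySem.List.enumerate_cons, PySem.List.enumerate_cons]
      simp only [zero_add]
      rw [ih (s + 1), ih 1, List.map_cons, List.map_map]
      congr 1
      · simp
      · congr 1
        funext p
        simp only [Function.comp, Prod.mk.injEq]
        exact ⟨by omega, trivial⟩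

theorem pv_bnds_append (xs ys : List Char) :
    pvBBounds (xs ++ ys) = pvBBounds xs ++ (pvBBounds ys).map (· + (xs.length : Int)) := by
  unfold pvBBounds
  rw [PySem.List.enumerate_append, pv_enumerate_shift ys, List.filter_append,
    List.filter_map, List.map_append, List.map_map]
  congr 1
  rw [List.filter_congr (fun (p : Int × Char) _ => (rfl :
    ((fun p : Int × Char => pvBIsEnd p.2) ∘
      (fun p : Int × Char => (p.1 + (0 + (xs.length : Int)), p.2))) p
      = (fun p : Int × Char => pvBIsEnd p.2) p))]
  rw [List.map_map]
  congr 1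
  funext p
  simp only [Function.comp]
  omega

theorem pv_mem_bnds {s : List Char} {b : Int} (hb : b ∈ pvBBounds s) :
    1 ≤ b ∧ b ≤ (s.length : Int) := by
  unfold pvBBounds at hb
  rcases List.mem_map.mp hb with ⟨p, hp, rfl⟩
  rcases List.mem_filter.mp hp with ⟨hpe, _⟩
  rcases (PySem.List.mem_enumerate_iff _ _ _).mp hpe with ⟨k, hk, rfl⟩
  refine ⟨by simp, by simp; omega⟩

theorem pv_lbOf_eq_getLast (s : List Char) :
    pvARescan s = ((pvBBounds s).getLast?).getD (-1) := by
  unfold pvARescan pvBBounds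
  have h := pv_foldl_if_getLast? (fun p : Int × Char => pvAIsEnd p.2)
    (fun p : Int × Char => p.1 + 1) (-1) (PySem.List.enumerate s 0)
  rw [h, List.getLast?_map]
  rfl

theorem pv_lbOf_bounds (s : List Char) :
    pvARescan s = -1 ∨ (1 ≤ pvARescan s ∧ pvARescan s ≤ (s.length : Int)) := by
  rw [pv_lbOf_eq_getLast]
  cases h : (pvBBounds s).getLast? with
  | none => left; rfl
  | some b => right; exact pv_mem_bnds (List.mem_of_getLast? h)

theorem pv_lbOf_append (xs : List Char) (c : Char) :
    pvARescan (xs ++ [c]) = if pvAIsEnd c then (xs.length : Int) + 1 else pvARescan xs := by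
  by_cases h : pvAIsEnd c <;>
    simp [pvARescan, PySem.List.enumerate_append, PySem.List.enumerate_cons,
      PySem.List.enumerate_nil, List.foldl_append, h]

-- the window of the precomputed boundary index equals the rescan of the m-char window
theorem pv_window (tl : List Char) (aN mN : Nat) (h : aN + mN ≤ tl.length) :
    (match ((pvBBounds tl).filter
        (fun b => (aN : Int) < b && b ≤ (aN : Int) + (mN : Int))).getLast? with
      | some b => b - (aN : Int)
      | none => (-1 : Int))
      = pvARescan ((tl.drop aN).take mN) := by
  have hsplit : tl = tl.take aN ++ ((tl.drop aN).take mN ++ (tl.drop aN).drop mN) := by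
    rw [List.take_append_drop, List.take_append_drop]
  have hpre : (tl.take aN).length = aN := by simp; omega
  have hwinlen : ((tl.drop aN).take mN).length = mN := by simp; omega
  conv_lhs => rw [hsplit]
  rw [pv_bnds_append, pv_bnds_append, List.map_append, List.filter_append,
    List.filter_append, hpre, hwinlen]
  have h1 : (pvBBounds (tl.take aN)).filter
      (fun b => (aN : Int) < b && b ≤ (aN : Int) + (mN : Int)) = [] := by
    rw [List.filter_eq_nil_iff]
    intro b hb
    have hm := pv_mem_bnds hb
    rw [hpre] at hm
    simp only [Bool.and_eq_true, decide_eq_true_eq, not_and]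
    omega
  have h2 : ((pvBBounds ((tl.drop aN).take mN)).map (· + (aN : Int))).filter
      (fun b => (aN : Int) < b && b ≤ (aN : Int) + (mN : Int))
      = (pvBBounds ((tl.drop aN).take mN)).map (· + (aN : Int)) := by
    rw [List.filter_map, List.filter_eq_self.mpr]
    intro b hb
    have hm := pv_mem_bnds hb
    rw [hwinlen] at hm
    simp only [Function.comp, Bool.and_eq_true, decide_eq_true_eq]
    omega
  have h5 : (((pvBBounds ((tl.drop aN).drop mN)).map (· + (mN : Int))).map (· + (aN : Int))).filter
      (fun b => (aN : Int) < b && b ≤ (aN : Int) + (mN : Int)) = [] := by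
    rw [List.filter_eq_nil_iff]
    intro b hb
    rcases List.mem_map.mp hb with ⟨b1, hb1, rfl⟩
    rcases List.mem_map.mp hb1 with ⟨b0, hb0, rfl⟩
    have hm := pv_mem_bnds hb0
    simp only [Bool.and_eq_true, decide_eq_true_eq, not_and]
    omega
  rw [h1, h2, h5, List.nil_append, List.append_nil, List.getLast?_map,
    pv_lbOf_eq_getLast]
  cases hlast : (pvBBounds ((tl.drop aN).take mN)).getLast? with
  | none => rfl
  | some b => simp

theorem pvG_stable (m : Nat) (hm : 1 ≤ m) :
    ∀ (f f' : Nat) (s : List Char), s.length < f → s.length < f' → pvG m f s = pvG m f' s := by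
  intro f
  induction f with
  | zero => intro f' s hf _; exact absurd hf (Nat.not_lt_zero _)
  | succ f ih =>
      intro f' s hf hf'
      match f' with
      | 0 => exact absurd hf' (Nat.not_lt_zero _)
      | f'' + 1 =>
          by_cases hms : m ≤ s.length
          · simp only [pvG, if_pos hms]
            have hcut : 1 ≤ (if pvARescan (s.take m) ≥ ((m / 2 : Nat) : Int)
                then (pvARescan (s.take m)).toNat else m) := by
              rcases pv_lbOf_bounds (s.take m) with hv | hv <;> split <;> omega
            congr 1
            apply ih
            · simp only [List.length_drop]; omega
            · simp only [List.length_drop]; omega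
          · simp only [pvG, if_neg hms]

theorem pvB_loop_eq (tl : List Char) (mN : Nat) (hm : 1 ≤ mN) :
    ∀ (fuel : Nat) (aN : Nat) (acc : List String), aN ≤ tl.length →
      pvBLoop tl (mN : Int) (pvBBounds tl) fuel (aN : Int) acc
        = acc ++ pvG mN fuel (tl.drop aN) := by
  intro fuel
  induction fuel with
  | zero => intro aN acc _; simp [pvBLoop, pvG]
  | succ fuel ih =>
      intro aN acc haN
      by_cases hc : (aN : Int) + (mN : Int) ≤ (tl.length : Int)
      · have hle : aN + mN ≤ tl.length := by omega
        have hwin := pv_window tl aN mN hle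
        simp only [pvBLoop, if_pos hc, hwin]
        have hfd : PySem.Int.floordiv (mN : Int) 2 = ((mN / 2 : Nat) : Int) :=
          PySem.Int.floordiv_natCast mN 2
        rw [hfd]
        have hlb := pv_lbOf_bounds ((tl.drop aN).take mN)
        have hwl : ((tl.drop aN).take mN).length = mN := by simp; omega
        rw [hwl] at hlb
        have hGunfold : pvG mN (fuel + 1) (tl.drop aN)
            = String.ofList ((tl.drop aN).take (if pvARescan ((tl.drop aN).take mN) ≥ ((mN / 2 : Nat) : Int)
                  then (pvARescan ((tl.drop aN).take mN)).toNat else mN))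
                :: pvG mN fuel ((tl.drop aN).drop (if pvARescan ((tl.drop aN).take mN) ≥ ((mN / 2 : Nat) : Int)
                  then (pvARescan ((tl.drop aN).take mN)).toNat else mN)) := by
          simp only [pvG,
            if_pos (by simp only [List.length_drop]; omega : mN ≤ (tl.drop aN).length)]
        by_cases hb : pvARescan ((tl.drop aN).take mN) ≥ ((mN / 2 : Nat) : Int)
        · have h1 : 1 ≤ pvARescan ((tl.drop aN).take mN) := by
            rcases hlb with hv | hv <;> omega
          rw [if_pos hb]
          have hcast : (aN : Int) + pvARescan ((tl.drop aN).take mN)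
              = ((aN : Nat) : Int) + (((pvARescan ((tl.drop aN).take mN)).toNat : Nat) : Int) := by
            omega
          rw [hcast, PySem.List.slice_natCast_add]
          rw [show ((aN : Int) + (((pvARescan ((tl.drop aN).take mN)).toNat : Nat) : Int))
              = (((aN + (pvARescan ((tl.drop aN).take mN)).toNat : Nat)) : Int) by
            push_cast; ring]
          rw [ih (aN + (pvARescan ((tl.drop aN).take mN)).toNat) _
              (by rcases hlb with hv | hv <;> omega)]
          have hdrop : tl.drop (aN + (pvARescan ((tl.drop aN).take mN)).toNat)
              = (tl.drop aN).drop (pvARescan ((tl.drop aN).take mN)).toNat := by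
            rw [List.drop_drop]
          rw [hdrop, hGunfold, if_pos hb, List.append_assoc]
          rfl
        · rw [if_neg hb]
          have hcast : (aN : Int) + (mN : Int) = ((aN : Nat) : Int) + ((mN : Nat) : Int) := rfl
          rw [hcast, PySem.List.slice_natCast_add]
          rw [show ((aN : Int) + ((mN : Nat) : Int)) = (((aN + mN : Nat)) : Int) by
            push_cast; ring]
          rw [ih (aN + mN) _ (by omega)]
          have hdrop : tl.drop (aN + mN) = (tl.drop aN).drop mN := by rw [List.drop_drop]
          rw [hdrop, hGunfold, if_neg hb, List.append_assoc]
          rfl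
      · have hlen : (tl.drop aN).length < mN := by simp only [List.length_drop]; omega
        simp only [pvBLoop, if_neg hc, pvG, if_neg (by omega : ¬ mN ≤ (tl.drop aN).length)]
        by_cases hlt : (aN : Int) < (tl.length : Int)
        · rw [if_pos hlt, if_neg (by rw [List.drop_eq_nil_iff]; omega),
            PySem.List.slice_from_natCast]
        · rw [if_neg hlt, if_pos (by rw [List.drop_eq_nil_iff]; omega), List.append_nil]

theorem pvA_fold_eq (mN : Nat) (hm : 1 ≤ mN) :
    ∀ (l : List Char) (chunks : List (List Char)) (buf : List Char), buf.length < mN →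
      pvAFin (l.foldl (pvAStep (mN : Int)) (chunks, buf, pvARescan buf))
        = (chunks.filter (fun ch => ch ≠ [])).map (fun l => String.ofList l)
            ++ pvG mN ((buf ++ l).length + 1) (buf ++ l) := by
  intro l
  induction l with
  | nil =>
      intro chunks buf hbuf
      simp only [List.foldl_nil, List.append_nil, pvG,
        if_neg (by omega : ¬ mN ≤ buf.length)]
      by_cases hb : buf = []
      · simp [pvAFin, hb]
      · simp [pvAFin, hb, List.filter_append]
  | cons c l' ih =>
      intro chunks buf hbuf
      rw [List.foldl_cons]
      have hlbeq : (if pvAIsEnd c then (((buf ++ [c]).length : Nat) : Int) else pvARescan buf)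
          = pvARescan (buf ++ [c]) := by
        rw [pv_lbOf_append]
        by_cases h : pvAIsEnd c <;> simp [h]
      simp only [pvAStep, hlbeq]
      have hbl : (buf ++ [c]).length = buf.length + 1 := by simp
      by_cases hfull : (((buf ++ [c]).length : Nat) : Int) ≥ (mN : Int)
      · rw [if_pos hfull]
        have hlen : (buf ++ [c]).length = mN := by omega
        have hlbb := pv_lbOf_bounds (buf ++ [c])
        rw [hlen] at hlbb
        have hfd : PySem.Int.floordiv (mN : Int) 2 = ((mN / 2 : Nat) : Int) :=
          PySem.Int.floordiv_natCast mN 2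
        have hlist : buf ++ c :: l' = (buf ++ [c]) ++ l' := by simp
        rw [hfd, hlist]
        have hGunfold : pvG mN (((buf ++ [c]) ++ l').length + 1) ((buf ++ [c]) ++ l')
            = String.ofList (((buf ++ [c]) ++ l').take
                  (if pvARescan (((buf ++ [c]) ++ l').take mN) ≥ ((mN / 2 : Nat) : Int)
                    then (pvARescan (((buf ++ [c]) ++ l').take mN)).toNat else mN))
                :: pvG mN (((buf ++ [c]) ++ l').length) (((buf ++ [c]) ++ l').drop
                  (if pvARescan (((buf ++ [c]) ++ l').take mN) ≥ ((mN / 2 : Nat) : Int)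
                    then (pvARescan (((buf ++ [c]) ++ l').take mN)).toNat else mN)) := by
          simp only [pvG, if_pos (by simp only [List.length_append, hlen]; omega :
            mN ≤ ((buf ++ [c]) ++ l').length)]
        have htakem : ((buf ++ [c]) ++ l').take mN = buf ++ [c] := by
          rw [List.take_append_of_le_length (by omega), ← hlen, List.take_length]
        by_cases hge : pvARescan (buf ++ [c]) ≥ ((mN / 2 : Nat) : Int)
        · rw [if_pos hge]
          have h1 : 1 ≤ pvARescan (buf ++ [c]) := by rcases hlbb with hv | hv <;> omega
          have hLm : (pvARescan (buf ++ [c])).toNat ≤ mN := by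
            rcases hlbb with hv | hv <;> omega
          have hGsplit : pvG mN (((buf ++ [c]) ++ l').length + 1) ((buf ++ [c]) ++ l')
              = String.ofList ((buf ++ [c]).take (pvARescan (buf ++ [c])).toNat)
                  :: pvG mN (((buf ++ [c]) ++ l').length)
                    ((buf ++ [c]).drop (pvARescan (buf ++ [c])).toNat ++ l') := by
            rw [hGunfold, htakem, if_pos hge,
              List.take_append_of_le_length (by omega),
              List.drop_append_of_le_length (by omega)]
          rw [PySem.List.slice_to _ (by omega), PySem.List.slice_from _ (by omega)]
          rw [ih (chunks ++ [(buf ++ [c]).take (pvARescan (buf ++ [c])).toNat])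
            ((buf ++ [c]).drop (pvARescan (buf ++ [c])).toNat)
            (by simp only [List.length_drop, hlen]; omega)]
          rw [hGsplit]
          rw [List.filter_append, List.map_append]
          have hpne : ((buf ++ [c]).take (pvARescan (buf ++ [c])).toNat) ≠ [] := by
            rw [Ne, List.take_eq_nil_iff]
            rintro (h0 | h0)
            · omega
            · simp at h0
          rw [show List.filter (fun ch => ch ≠ [])
              [(buf ++ [c]).take (pvARescan (buf ++ [c])).toNat]
              = [(buf ++ [c]).take (pvARescan (buf ++ [c])).toNat] by simp [hpne]]
          rw [List.append_assoc]
          congr 1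
          rw [List.map_singleton, List.singleton_append]
          congr 1
          apply pvG_stable mN hm
          · exact Nat.lt_succ_self _
          · simp only [List.length_append, List.length_drop, hlen]
            omega
        · rw [if_neg hge]
          have htake : (buf ++ [c]).take mN = buf ++ [c] := by rw [← hlen, List.take_length]
          have hdropm : (buf ++ [c]).drop mN = [] := by rw [← hlen, List.drop_length]
          rw [PySem.List.slice_to _ (by omega), PySem.List.slice_from _ (by omega)]
          simp only [Int.toNat_natCast]
          rw [htake, hdropm]
          rw [ih (chunks ++ [buf ++ [c]]) [] (by simpa using hm)]
          rw [hGunfold, htakem, if_neg hge, htakem,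
            List.drop_append_of_le_length (by omega), hdropm, List.nil_append]
          rw [List.filter_append, List.map_append]
          rw [show List.filter (fun ch => ch ≠ []) [buf ++ [c]] = [buf ++ [c]] by simp]
          rw [List.append_assoc]
          congr 1
          rw [List.map_singleton, List.singleton_append]
          congr 1
          apply pvG_stable mN hm
          · exact Nat.lt_succ_self _
          · simp only [List.length_append, hlen]
            omega
      · rw [if_neg hfull]
        have hb2 : (buf ++ [c]).length < mN := by omega
        rw [ih chunks (buf ++ [c]) hb2]
        have hre : (buf ++ [c]) ++ l' = buf ++ c :: l' := by simp
        rw [hre]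

-- ===== VERDICT (by name: the statement is the Claim_ definition above) =====
theorem chunk_text_sentence_aware_py_spec : Claim_equal_chunk_text_sentence_aware_py := by
  intro text max_chars _ hpre
  unfold Pre_chunk_text_sentence_aware_py at hpre
  obtain ⟨mN, rfl⟩ := Int.eq_ofNat_of_zero_le (by omega : (0 : Int) ≤ max_chars)
  have hm : 1 ≤ mN := by exact_mod_cast hpre
  unfold Spec_chunk_text_sentence_aware_py
  unfold chunk_text_sentence_aware_py chunk_text_sentence_aware_py_alt
  by_cases h : (text.toList.length : Int) ≤ (mN : Int)
  · simp only [if_pos h]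
  · simp only [if_neg h]
    show pvAFin (text.toList.foldl (pvAStep (mN : Int)) ([], [], -1))
        = pvBLoop text.toList (mN : Int) (pvBBounds text.toList)
            (text.toList.length + 1) 0 []
    rw [show (([], [], (-1 : Int)) : List (List Char) × List Char × Int)
        = (([] : List (List Char)), ([] : List Char), pvARescan []) from rfl]
    rw [pvA_fold_eq mN hm text.toList [] [] (by simpa using hm)]
    rw [show ((0 : Int)) = (((0 : Nat) : Nat) : Int) from rfl]
    rw [pvB_loop_eq text.toList mN hm (text.toList.length + 1) 0 [] (Nat.zero_le _)]
    simp
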